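-- pv_equiv track=rewrite | github.com/lzablocki-phonemic/fpga-ethernet-edu | fpga/tests/test_fpga_core_10g.py | fir_reference
-- ===== SOURCE A (Python) =====
-- def fir_reference(samples, coeffs, coeff_width=16):
--     """Compute reference FIR output for a list of byte samples.
--
--     Mimics the hardware: signed 8-bit samples, signed coeff_width-bit coefficients,
--     truncated to 8-bit output.
--     """
--     num_taps = len(coeffs)
--     half = 1 << (coeff_width - 1)
--     mask = (1 << coeff_width) - 1
--     out = []
--     for n in range(len(samples)):
--         acc = 0
--         for k in range(num_taps):
--             idx = n - k
--             x = samples[idx] if idx >= 0 else 0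
--             # Treat sample as signed 8-bit
--             if x > 127:
--                 x -= 256
--             # Treat coefficient as signed coeff_width-bit
--             c = coeffs[k] & mask
--             if c >= half:
--                 c -= (1 << coeff_width)
--             acc += x * c
--         out.append(acc & 0xFF)
--     return out
-- ===== SOURCE B (Python) =====
-- def _signed(c, half, span):
--     """Interpret c as a signed (log2 span)-bit value."""
--     c &= span - 1
--     return c - span if c >= half else c
--
--
-- def fir_reference(samples, coeffs, coeff_width=16):
--     """Coefficient-major (scatter) FIR: convert signs once, then add each
--     coefficient's shifted contribution across the whole output."""
--     half = 1 << (coeff_width - 1)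
--     span = 1 << coeff_width
--     xs = [x - 256 if x > 127 else x for x in samples]
--     cs = [_signed(c, half, span) for c in coeffs]
--     acc = [0] * len(samples)
--     for k, c in enumerate(cs):
--         acc = [a + (c * xs[i - k] if i >= k else 0) for i, a in enumerate(acc)]
--     return [a & 0xFF for a in acc]
-- ===== Notes on version B (the rewrite author's own statement) =====
-- stated objective: faster
-- what changed: Sample and coefficient sign conversions are hoisted out of the O(N*M) inner loop (done once per element instead of once per (n,k) pair) and the convolution is computed coefficient-major (each coefficient's shifted contribution added across the whole accumulator list) instead of sample-major gather.
import Mathlib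
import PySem

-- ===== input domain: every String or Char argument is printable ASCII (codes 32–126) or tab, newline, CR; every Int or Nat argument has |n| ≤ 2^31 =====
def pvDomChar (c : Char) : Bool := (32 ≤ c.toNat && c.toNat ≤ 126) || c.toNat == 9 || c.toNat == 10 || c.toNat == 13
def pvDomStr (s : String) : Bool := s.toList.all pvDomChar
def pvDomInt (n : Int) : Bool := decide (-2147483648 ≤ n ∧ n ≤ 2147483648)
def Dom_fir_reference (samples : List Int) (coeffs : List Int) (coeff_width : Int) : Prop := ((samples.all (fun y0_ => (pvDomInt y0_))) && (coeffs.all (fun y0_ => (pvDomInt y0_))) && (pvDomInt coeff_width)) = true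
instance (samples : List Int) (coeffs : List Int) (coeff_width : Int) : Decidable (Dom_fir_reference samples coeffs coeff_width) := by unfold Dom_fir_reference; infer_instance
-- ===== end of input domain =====

-- B hoists the per-element sign conversions out of the O(N*M) inner loop and computes the
-- convolution coefficient-major (scatter) instead of sample-major gather; return value only.

-- ===== PORT A =====
-- '1 << e' is ported as '(1 : Int) <<< e.toNat': exact since Pre_ guarantees coeff_width ≥ 1.
-- 'samples[idx]' is only reached with 0 ≤ idx < len(samples), so pyGetD's default is never used.
def fir_reference (samples : List Int) (coeffs : List Int) (coeff_width : Int) : List Int :=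
  let numTaps : Int := (coeffs.length : Int)
  let half : Int := (1 : Int) <<< (coeff_width - 1).toNat
  let mask : Int := ((1 : Int) <<< coeff_width.toNat) - 1
  (PySem.List.pyRange 0 (samples.length : Int) 1).foldl (fun out n =>
    let acc : Int := (PySem.List.pyRange 0 numTaps 1).foldl (fun acc k =>
      let idx : Int := n - k
      let x : Int := if idx ≥ 0 then PySem.List.pyGetD samples idx 0 else 0
      let x : Int := if x > 127 then x - 256 else x
      let c : Int := PySem.Int.band (PySem.List.pyGetD coeffs k 0) mask
      let c : Int := if c ≥ half then c - ((1 : Int) <<< coeff_width.toNat) else c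
      acc + x * c) 0
    out ++ [PySem.Int.band acc 255]) []

-- ===== PORT B =====
def pvSigned (c half span : Int) : Int :=
  let c := PySem.Int.band c (span - 1)
  if c ≥ half then c - span else c

-- 'xs[i - k]' is only reached with 0 ≤ i - k < len(xs), so pyGetD's default is never used.
def fir_reference_alt (samples : List Int) (coeffs : List Int) (coeff_width : Int) : List Int :=
  let half : Int := (1 : Int) <<< (coeff_width - 1).toNat
  let span : Int := (1 : Int) <<< coeff_width.toNat
  let xs : List Int := samples.map (fun x => if x > 127 then x - 256 else x)
  let cs : List Int := coeffs.map (fun c => pvSigned c half span)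
  let acc : List Int := (PySem.List.enumerate cs 0).foldl (fun acc p =>
      (PySem.List.enumerate acc 0).map (fun q =>
        q.2 + if q.1 ≥ p.1 then p.2 * PySem.List.pyGetD xs (q.1 - p.1) 0 else 0))
    (List.replicate samples.length (0 : Int))
  acc.map (fun a => PySem.Int.band a 255)

-- ===== PRECONDITION & SPEC =====
-- Pre_ excludes coeff_width ≤ 0, on which Python A raises ValueError ('negative shift count').
def Pre_fir_reference (samples : List Int) (coeffs : List Int) (coeff_width : Int) : Prop :=
  1 ≤ coeff_width
instance (samples : List Int) (coeffs : List Int) (coeff_width : Int) : Decidable (Pre_fir_reference samples coeffs coeff_width) := by unfold Pre_fir_reference; infer_instance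
def pvWitness_fir_reference : List Int × List Int × Int := ([1, 200, -3], [5, -9], 8)

def Spec_fir_reference (samples : List Int) (coeffs : List Int) (coeff_width : Int) (out : List Int) : Prop := out = fir_reference_alt samples coeffs coeff_width
instance (samples : List Int) (coeffs : List Int) (coeff_width : Int) (out : List Int) : Decidable (Spec_fir_reference samples coeffs coeff_width out) := by unfold Spec_fir_reference; infer_instance

-- ===== CLAIM (what is proved, stated in full; the proofs are below) =====
def Claim_equal_fir_reference : Prop := ∀ (samples : List Int) (coeffs : List Int) (coeff_width : Int), Dom_fir_reference samples coeffs coeff_width → Pre_fir_reference samples coeffs coeff_width → Spec_fir_reference samples coeffs coeff_width (fir_reference samples coeffs coeff_width)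

-- ===== LEMMAS AND PROOFS =====

-- sign conversion of a sample, as both ports perform it
def pvSx (x : Int) : Int := if x > 127 then x - 256 else x

-- the common closed form both ports are reduced to
def pvTerm (samples coeffs : List Int) (w n k : Int) : Int :=
  if n - k ≥ 0 then
    pvSx (PySem.List.pyGetD samples (n - k) 0) *
      pvSigned (PySem.List.pyGetD coeffs k 0) ((1 : Int) <<< (w - 1).toNat) ((1 : Int) <<< w.toNat)
  else 0

def pvOut (samples coeffs : List Int) (w n : Int) : Int :=
  ((PySem.List.pyRange 0 (coeffs.length : Int) 1).map (pvTerm samples coeffs w n)).sum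

-- A reduces to the closed form
theorem firA_eq (samples coeffs : List Int) (w : Int) :
    fir_reference samples coeffs w =
      (PySem.List.pyRange 0 (samples.length : Int) 1).map
        (fun n => PySem.Int.band (pvOut samples coeffs w n) 255) := by
  unfold fir_reference
  simp only []
  rw [PySem.List.foldl_append_singleton_eq_map]
  simp only [List.nil_append]
  refine List.map_congr_left (fun n _ => ?_)
  have hfun : ∀ (acc k : Int),
      acc +
        (if (if n - k ≥ 0 then PySem.List.pyGetD samples (n - k) 0 else 0) > 127 then
            (if n - k ≥ 0 then PySem.List.pyGetD samples (n - k) 0 else 0) - 256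
          else if n - k ≥ 0 then PySem.List.pyGetD samples (n - k) 0 else 0) *
          (if PySem.Int.band (PySem.List.pyGetD coeffs k 0) (((1:Int) <<< w.toNat) - 1) ≥ ((1:Int) <<< (w - 1).toNat) then
            PySem.Int.band (PySem.List.pyGetD coeffs k 0) (((1:Int) <<< w.toNat) - 1) - ((1:Int) <<< w.toNat)
          else PySem.Int.band (PySem.List.pyGetD coeffs k 0) (((1:Int) <<< w.toNat) - 1)) =
        acc + pvTerm samples coeffs w n k := by
    intro acc k
    simp only [pvTerm, pvSx, pvSigned]
    generalize ((1:Int) <<< (w - 1).toNat) = H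
    generalize hS : ((1:Int) <<< w.toNat) = S
    generalize PySem.Int.band (PySem.List.pyGetD coeffs k 0) (S - 1) = b
    generalize PySem.List.pyGetD samples (n - k) 0 = x
    split_ifs <;> first | rfl | omega
  simp only [hfun]
  rw [PySem.List.foldl_add (g := fun k => pvTerm samples coeffs w n k) (a := 0)]
  simp [pvOut]

-- B's step function, abbreviated for the lemmas below
def pvStep (xs : List Int) (acc : List Int) (p : Int × Int) : List Int :=
  (PySem.List.enumerate acc 0).map (fun q =>
    q.2 + if q.1 ≥ p.1 then p.2 * PySem.List.pyGetD xs (q.1 - p.1) 0 else 0)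

theorem pvStep_len (xs acc : List Int) (p : Int × Int) : (pvStep xs acc p).length = acc.length := by
  simp [pvStep, PySem.List.length_enumerate]

theorem pvStep_getD (xs acc : List Int) (p : Int × Int) (n : Nat) (hn : n < acc.length) :
    (pvStep xs acc p).getD n 0 =
      acc.getD n 0 + (if (n : Int) ≥ p.1 then p.2 * PySem.List.pyGetD xs ((n : Int) - p.1) 0 else 0) := by
  simp [pvStep, List.getD_eq_getElem?_getD, PySem.List.getElem?_enumerate,
    List.getElem?_eq_getElem hn]

theorem B_fold_len (xs : List Int) (cs : List Int) (s : Int) (acc : List Int) :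
    ((PySem.List.enumerate cs s).foldl (pvStep xs) acc).length = acc.length := by
  induction cs generalizing s acc with
  | nil => simp [PySem.List.enumerate_nil]
  | cons c t ih =>
      rw [PySem.List.enumerate_cons]
      simp only [List.foldl_cons]
      rw [ih, pvStep_len]

theorem B_fold_getD (xs : List Int) (cs : List Int) (s : Int) (acc : List Int)
    (n : Nat) (hn : n < acc.length) :
    ((PySem.List.enumerate cs s).foldl (pvStep xs) acc).getD n 0 =
      acc.getD n 0 + ((PySem.List.enumerate cs s).map (fun p =>
        if (n : Int) ≥ p.1 then p.2 * PySem.List.pyGetD xs ((n : Int) - p.1) 0 else 0)).sum := by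
  induction cs generalizing s acc with
  | nil => simp [PySem.List.enumerate_nil]
  | cons c t ih =>
      rw [PySem.List.enumerate_cons]
      simp only [List.foldl_cons, List.map_cons, List.sum_cons]
      rw [ih (s + 1) _ (by rw [pvStep_len]; exact hn),
        pvStep_getD xs acc (s, c) n hn]
      ring

-- B reduces to the closed form
theorem firB_eq (samples coeffs : List Int) (w : Int) :
    fir_reference_alt samples coeffs w =
      (PySem.List.pyRange 0 (samples.length : Int) 1).map
        (fun n => PySem.Int.band (pvOut samples coeffs w n) 255) := by
  unfold fir_reference_alt
  simp only []
  rw [show (fun (acc : List Int) (p : Int × Int) =>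
      (PySem.List.enumerate acc 0).map (fun q =>
        q.2 + if q.1 ≥ p.1 then p.2 * PySem.List.pyGetD (samples.map (fun x => if x > 127 then x - 256 else x)) (q.1 - p.1) 0 else 0))
      = pvStep (samples.map (fun x => if x > 127 then x - 256 else x)) from rfl]
  apply List.ext_getElem
  · simp [B_fold_len, PySem.List.length_pyRange_one]
  · intro i h1 h2
    have hi : i < samples.length := by
      simpa [B_fold_len] using h1
    rw [List.getElem_map, List.getElem_map, PySem.List.getElem_pyRange_one]
    rw [← List.getD_eq_getElem _ 0 (by rw [B_fold_len]; simpa using hi)]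
    rw [B_fold_getD _ _ _ _ i (by simpa using hi)]
    rw [PySem.List.enumerate_eq_map_pyRange (d := 0), List.map_map]
    simp only [List.getD_eq_getElem?_getD, List.getElem?_replicate, hi, if_pos,
      Option.getD_some, zero_add, PySem.List.len, List.length_map, Function.comp_def]
    congr 1
    unfold pvOut
    refine congrArg _ (List.map_congr_left (fun j hj => ?_))
    rw [PySem.List.mem_pyRange_one] at hj
    simp only [pvTerm, pvSx]
    by_cases hij : (i : Int) - j ≥ 0
    · rw [if_pos (show (i : Int) ≥ j by omega), if_pos hij]
      rw [PySem.List.pyGetD_eq_getElem _ _ hj.1 (by simp only [List.length_map]; omega),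
        PySem.List.pyGetD_eq_getElem _ _ hij (by simp only [List.length_map]; omega),
        PySem.List.pyGetD_eq_getElem _ _ hij (by omega),
        PySem.List.pyGetD_eq_getElem _ _ hj.1 (by omega)]
      simp only [List.getElem_map]
      rw [mul_comm]
    · rw [if_neg (by omega), if_neg (by omega)]

-- ===== VERDICT (by name: the statement is the Claim_ definition above) =====
theorem fir_reference_spec : Claim_equal_fir_reference := by
  intro samples coeffs w _ _
  unfold Spec_fir_reference
  rw [firA_eq, firB_eq]
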